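-- pv_equiv track=rewrite | github.com/Maher-Reven/HackerRank | Algorithms/Bit Manipulation/Sansa and XOR.py | sansaXor
-- ===== SOURCE A (Python) =====
-- def sansaXor(arr):
--     res=0
--     arr_len=len(arr)
--     j=1
--     for i in range(len(arr)):
--         if j*(arr_len)%2==1:
--             res^=arr[i]
--         j+=1
--         arr_len-=1
--     return res
-- ===== SOURCE B (Python) =====
-- def sansaXor(arr):
--     n = len(arr)
--     if n % 2 == 0:
--         return 0
--     res = 0
--     for i in range(0, n, 2):
--         res ^= arr[i]
--     return res
-- ===== Notes on version B (the rewrite author's own statement) =====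
-- stated objective: faster
-- what changed: B replaces A's per-index j*(arr_len) parity bookkeeping with the closed-form parity fact (i+1)*(n-i) is odd iff n is odd and i is even: it returns 0 immediately for even-length input and otherwise XORs only the even-index elements via range(0, n, 2).
import Mathlib
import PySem

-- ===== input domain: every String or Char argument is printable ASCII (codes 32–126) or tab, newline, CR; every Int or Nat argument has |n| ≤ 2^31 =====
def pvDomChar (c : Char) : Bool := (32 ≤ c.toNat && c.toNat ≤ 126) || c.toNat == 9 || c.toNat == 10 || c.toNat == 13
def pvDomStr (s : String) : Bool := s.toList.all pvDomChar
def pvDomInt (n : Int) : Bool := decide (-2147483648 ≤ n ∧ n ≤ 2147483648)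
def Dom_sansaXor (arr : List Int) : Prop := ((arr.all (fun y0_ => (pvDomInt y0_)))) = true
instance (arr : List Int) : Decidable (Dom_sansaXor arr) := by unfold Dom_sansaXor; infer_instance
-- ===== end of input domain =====

-- B returns 0 for even-length input and XORs only the even-index elements otherwise,
-- using the closed-form parity of (i+1)*(n-i) instead of A's per-index j/arr_len bookkeeping.

-- ===== PORT A =====
-- arr[i] is always in range (i ∈ range(len(arr))), so pyGetD's default 0 is never used.
def sansaXor (arr : List Int) : Int :=
  ((PySem.List.pyRange 0 (arr.length : Int) 1).foldl
    (fun (st : Int × Int × Int) i =>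
      ((if PySem.Int.mod (st.2.2 * st.2.1) 2 = 1
          then PySem.Int.bxor st.1 (PySem.List.pyGetD arr i 0) else st.1),
       st.2.1 - 1, st.2.2 + 1))
    (0, (arr.length : Int), 1)).1

-- ===== PORT B =====
-- arr[i] is always in range (i ∈ range(0, n, 2), n = len(arr)), so pyGetD's default 0 is never used.
def sansaXor_alt (arr : List Int) : Int :=
  if PySem.Int.mod (arr.length : Int) 2 = 0 then 0
  else
    (PySem.List.pyRange 0 (arr.length : Int) 2).foldl
      (fun res i => PySem.Int.bxor res (PySem.List.pyGetD arr i 0)) 0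

-- ===== PRECONDITION & SPEC =====
def Spec_sansaXor (arr : List Int) (out : Int) : Prop := out = sansaXor_alt arr
instance (arr : List Int) (out : Int) : Decidable (Spec_sansaXor arr out) := by unfold Spec_sansaXor; infer_instance

-- ===== CLAIM (what is proved, stated in full; the proofs are below) =====
def Claim_equal_sansaXor : Prop := ∀ (arr : List Int), Dom_sansaXor arr → Spec_sansaXor arr (sansaXor arr)

-- ===== LEMMAS AND PROOFS =====

/-- Left XOR-fold of the even-index elements, with accumulator `res`. -/
def gOdd : Int → List Int → Int
  | res, [] => res
  | res, [a] => PySem.Int.bxor res a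
  | res, a :: _ :: rest => gOdd (PySem.Int.bxor res a) rest

/-- A's loop, rewritten over `List.range`/`List.getD`, computes `gOdd` on odd length and
leaves `res` unchanged on even length, for any odd starting `j`. -/
lemma aux_A : ∀ (n : Nat) (arr : List Int), arr.length = n → ∀ (res j : Int), j % 2 = 1 →
    ((List.range arr.length).foldl
      (fun (st : Int × Int × Int) k =>
        ((if PySem.Int.mod (st.2.2 * st.2.1) 2 = 1
            then PySem.Int.bxor st.1 (arr.getD k 0) else st.1),
         st.2.1 - 1, st.2.2 + 1))
      (res, (arr.length : Int), j)).1
    = if arr.length % 2 = 1 then gOdd res arr else res := by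
  intro n
  induction n using Nat.strong_induction_on with
  | _ n ih =>
    intro arr hlen res j hj
    match arr with
    | [] => simp
    | [a] =>
      rw [show [a].length = 1 from rfl, List.range_one]
      simp only [List.foldl_cons, List.foldl_nil, gOdd]
      rw [PySem.Int.mod_eq_emod_of_pos (by norm_num : (0:Int) < 2)]
      simp [hj, List.getD]
    | a :: b :: rest =>
      have h2 : (a :: b :: rest).length = 2 + rest.length := by simp; omega
      rw [h2, List.range_add, List.foldl_append]
      have hr2 : List.range 2 = [0, 1] := by decide
      rw [hr2]
      simp only [List.foldl_cons, List.foldl_nil, List.getD_cons_zero, List.getD_cons_succ]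
      have hc0 : PySem.Int.mod (j * ((2 + rest.length : Nat) : Int)) 2
          = (rest.length : Int) % 2 := by
        rw [PySem.Int.mod_eq_emod_of_pos (by norm_num : (0:Int) < 2), Int.mul_emod, hj]
        push_cast
        omega
      rw [hc0]
      have hc1 : PySem.Int.mod ((j+1) * (((2 + rest.length : Nat) : Int) - 1)) 2 ≠ 1 := by
        rw [PySem.Int.mod_eq_emod_of_pos (by norm_num : (0:Int) < 2), Int.mul_emod]
        have : (j+1) % 2 = 0 := by omega
        rw [this]
        omega
      rw [if_neg hc1]
      have hst : (((2 + rest.length : Nat) : Int) - 1 - 1) = (rest.length : Int) := by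
        push_cast; omega
      rw [hst, List.foldl_map]
      have hfun : (fun (st : Int × Int × Int) (k : Nat) =>
            ((if PySem.Int.mod (st.2.2 * st.2.1) 2 = 1
                then PySem.Int.bxor st.1 ((a :: b :: rest).getD (2 + k) 0) else st.1),
             st.2.1 - 1, st.2.2 + 1))
          = (fun (st : Int × Int × Int) (k : Nat) =>
            ((if PySem.Int.mod (st.2.2 * st.2.1) 2 = 1
                then PySem.Int.bxor st.1 (rest.getD k 0) else st.1),
             st.2.1 - 1, st.2.2 + 1)) := by
        funext st k
        rw [show 2 + k = (k + 1) + 1 from by omega]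
        rw [List.getD_cons_succ, List.getD_cons_succ]
      rw [hfun]
      rw [ih rest.length (by omega) rest rfl
        (if (rest.length : Int) % 2 = 1 then PySem.Int.bxor res a else res) (j + 1 + 1)
        (by omega)]
      by_cases hmo : rest.length % 2 = 1
      · rw [if_pos (by omega : ((rest.length : Int)) % 2 = 1), if_pos hmo,
          if_pos (by omega : (2 + rest.length) % 2 = 1)]
        simp [gOdd]
      · rw [if_neg (by omega : ¬ ((rest.length : Int)) % 2 = 1), if_neg hmo,
          if_neg (by omega : ¬ (2 + rest.length) % 2 = 1)]

/-- B's loop over the even indices, rewritten over `List.range`/`List.getD`, computes `gOdd`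
on odd-length input. -/
lemma aux_B : ∀ (n : Nat) (arr : List Int), arr.length = n → ∀ (res : Int),
    arr.length % 2 = 1 →
    (List.range ((arr.length + 1) / 2)).foldl
      (fun r k => PySem.Int.bxor r (arr.getD (2 * k) 0)) res = gOdd res arr := by
  intro n
  induction n using Nat.strong_induction_on with
  | _ n ih =>
    intro arr hlen res hodd
    match arr with
    | [] => simp at hodd
    | [a] =>
      rw [show ([a].length + 1) / 2 = 1 from by simp, List.range_one]
      simp [gOdd, List.getD]
    | a :: b :: rest =>
      have h2 : ((a :: b :: rest).length + 1) / 2 = 1 + (rest.length + 1) / 2 := by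
        simp; omega
      rw [h2, List.range_add, List.foldl_append, List.range_one]
      simp only [List.foldl_cons, List.foldl_nil, Nat.mul_zero, List.getD_cons_zero]
      rw [List.foldl_map]
      have hfun : (fun (r : Int) (k : Nat) =>
            PySem.Int.bxor r ((a :: b :: rest).getD (2 * (1 + k)) 0))
          = (fun (r : Int) (k : Nat) => PySem.Int.bxor r (rest.getD (2 * k) 0)) := by
        funext r k
        rw [show 2 * (1 + k) = (2 * k + 1) + 1 from by omega]
        rw [List.getD_cons_succ, List.getD_cons_succ]
      rw [hfun]
      rw [ih rest.length (by omega) rest rfl (PySem.Int.bxor res a)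
        (by simp at hodd; omega)]
      rfl

lemma pyRange_one_nat (n : Nat) :
    PySem.List.pyRange 0 (n : Int) 1 = (List.range n).map (fun k : Nat => (k : Int)) := by
  rw [PySem.List.pyRange_one]
  simp

lemma pyRange_two (n : Nat) :
    PySem.List.pyRange 0 (n : Int) 2
      = (List.range ((n + 1) / 2)).map (fun k : Nat => (2 * (k : Int))) := by
  rw [PySem.List.pyRange_of_pos 0 (n : Int) (by norm_num)]
  have h1 : ((((n:Int)) - 0 + 2 - 1) / 2).toNat = (n + 1) / 2 := by omega
  cases Nat.eq_zero_or_pos n with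
  | inl h0 => subst h0; simp
  | inr hp =>
    rw [if_pos (by exact_mod_cast hp), h1]
    simp

lemma A_char (arr : List Int) :
    sansaXor arr = if arr.length % 2 = 1 then gOdd 0 arr else 0 := by
  unfold sansaXor
  rw [pyRange_one_nat, List.foldl_map]
  have hfun : (fun (st : Int × Int × Int) (k : Nat) =>
        ((if PySem.Int.mod (st.2.2 * st.2.1) 2 = 1
            then PySem.Int.bxor st.1 (PySem.List.pyGetD arr (k : Int) 0) else st.1),
         st.2.1 - 1, st.2.2 + 1))
      = (fun (st : Int × Int × Int) (k : Nat) =>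
        ((if PySem.Int.mod (st.2.2 * st.2.1) 2 = 1
            then PySem.Int.bxor st.1 (arr.getD k 0) else st.1),
         st.2.1 - 1, st.2.2 + 1)) := by
    funext st k
    rw [PySem.List.pyGetD_natCast]
  rw [hfun]
  exact aux_A arr.length arr rfl 0 1 (by norm_num)

lemma B_char (arr : List Int) :
    sansaXor_alt arr = if arr.length % 2 = 1 then gOdd 0 arr else 0 := by
  unfold sansaXor_alt
  by_cases hmo : arr.length % 2 = 1
  · rw [if_neg (by rw [PySem.Int.mod_eq_emod_of_pos (by norm_num : (0:Int) < 2)]; omega),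
      if_pos hmo, pyRange_two, List.foldl_map]
    have hfun : (fun (res : Int) (k : Nat) =>
          PySem.Int.bxor res (PySem.List.pyGetD arr (2 * (k : Int)) 0))
        = (fun (res : Int) (k : Nat) => PySem.Int.bxor res (arr.getD (2 * k) 0)) := by
      funext res k
      rw [show (2 * (k : Int)) = ((2 * k : Nat) : Int) from by push_cast; ring,
        PySem.List.pyGetD_natCast]
    rw [hfun]
    exact aux_B arr.length arr rfl 0 hmo
  · rw [if_pos (by rw [PySem.Int.mod_eq_emod_of_pos (by norm_num : (0:Int) < 2)]; omega),
      if_neg hmo]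

-- ===== VERDICT (by name: the statement is the Claim_ definition above) =====
theorem sansaXor_spec : Claim_equal_sansaXor := by
  intro arr _
  unfold Spec_sansaXor
  rw [A_char, B_char]
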